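-- pv_equiv track=rewrite | github.com/mKopac/ZP_Kopac | PythonFormatter.py | fix_first_line_after_colon
-- ===== SOURCE A (Python) =====
-- def count_leading_spaces(line):
--     """Return the number of leading spaces in the given line."""
--     return len(line) - len(line.lstrip(' '))
--
-- def fix_first_line_after_colon(lines):
--     """
--     For every line that ends with a colon (":"),
--     check the next non-empty line. If its indent is less than or equal to the parent's indent,
--     reindent that line to (parent's indent + 4). Otherwise, leave it as is.
--     """
--     new_lines = list(lines)
--     for i in range(len(new_lines) - 1):
--         if new_lines[i].rstrip().endswith(":"):
--             parent_indent = count_leading_spaces(new_lines[i])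
--             j = i + 1
--             while j < len(new_lines) and new_lines[j].strip() == "":
--                 j += 1
--             if j < len(new_lines):
--                 next_indent = count_leading_spaces(new_lines[j])
--                 if next_indent <= parent_indent:
--                     new_lines[j] = " " * (parent_indent + 4) + new_lines[j].lstrip()
--     return new_lines
-- ===== SOURCE B (Python) =====
-- def fix_first_line_after_colon(lines):
--     """
--     Single forward pass: carry the last non-blank line already emitted; when a
--     non-blank line arrives, reindent it iff that carried line ends with ":" and
--     its own indent does not exceed the carried line's indent.
--     """
--     out = []
--     prev = None
--     for line in lines:
--         if line.strip() != "":
--             if prev is not None and prev.rstrip().endswith(":"):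
--                 pi = _indent(prev)
--                 if _indent(line) <= pi:
--                     line = " " * (pi + 4) + line.lstrip()
--             prev = line
--         out.append(line)
--     return out
--
--
-- def _indent(s):
--     k = 0
--     while k < len(s) and s[k] == ' ':
--         k += 1
--     return k
-- ===== Notes on version B (the rewrite author's own statement) =====
-- stated objective: simpler
-- what changed: B is a single forward pass that carries the last non-blank line already emitted and reindents each arriving non-blank line against it, instead of A's indexed loop that, for every colon line, rescans forward over blank lines to find the line to reindent.
import Mathlib
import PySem

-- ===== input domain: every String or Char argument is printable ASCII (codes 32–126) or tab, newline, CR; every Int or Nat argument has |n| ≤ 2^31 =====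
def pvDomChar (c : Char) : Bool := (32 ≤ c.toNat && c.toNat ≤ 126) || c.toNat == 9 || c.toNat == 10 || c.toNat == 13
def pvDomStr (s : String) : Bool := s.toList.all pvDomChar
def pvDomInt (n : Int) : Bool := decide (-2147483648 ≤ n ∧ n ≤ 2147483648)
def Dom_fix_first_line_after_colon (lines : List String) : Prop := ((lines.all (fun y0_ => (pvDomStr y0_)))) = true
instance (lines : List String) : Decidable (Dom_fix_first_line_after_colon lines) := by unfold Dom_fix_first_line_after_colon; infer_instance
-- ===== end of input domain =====

-- B replaces A's indexed loop with an inner while-scan by a single forward pass that carries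
-- the last non-blank line already emitted (objective: simpler; no speed claim).

-- ===== PORT A =====

-- Python: len(line) - len(line.lstrip(' ')); lstrip(' ') ported by hand as dropWhile (· == ' ') — exact, it strips spaces only
def pvCountLeadingSpaces (line : String) : Nat :=
  line.toList.length - (line.toList.dropWhile (· == ' ')).length

-- the inner 'while j < len(new_lines) and new_lines[j].strip() == "": j += 1'
def pvSkipBlank (nl : List String) (j : Nat) : Nat :=
  if j < nl.length ∧ PySem.Str.strip (nl.getD j "") = "" then pvSkipBlank nl (j + 1) else j
termination_by nl.length - j
decreasing_by omega

-- one iteration of A's 'for i in range(len(new_lines) - 1)' body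
def pvStepA (nl : List String) (i : Nat) : List String :=
  if PySem.Str.endswith (PySem.Str.rstrip (nl.getD i "")) ":" then
    let parent := pvCountLeadingSpaces (nl.getD i "")
    let j := pvSkipBlank nl (i + 1)
    if j < nl.length then
      if pvCountLeadingSpaces (nl.getD j "") ≤ parent then
        -- '" " * (parent+4) + new_lines[j].lstrip()' built as a char list (String ++ is opaque to the kernel)
        nl.set j (String.ofList (List.replicate (parent + 4) ' ' ++ (PySem.Str.lstrip (nl.getD j "")).toList))
      else nl
    else nl
  else nl

def fix_first_line_after_colon (lines : List String) : List String :=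
  (List.range (lines.length - 1)).foldl pvStepA lines

-- ===== PORT B =====

-- B's '_indent': count the leading spaces by scanning while they are spaces
def pvIndent (s : String) : Nat :=
  (s.toList.takeWhile (· == ' ')).length

-- B's loop: structural recursion over the remaining lines, carrying 'prev',
-- the last non-blank line already emitted (None before the first one)
def pvGoB : Option String → List String → List String
  | _, [] => []
  | prev, l :: rest =>
    if PySem.Str.strip l = "" then
      l :: pvGoB prev rest
    else
      let l' :=
        match prev with
        | none => l
        | some p =>
          if PySem.Str.endswith (PySem.Str.rstrip p) ":" then
            if pvIndent l ≤ pvIndent p then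
              String.ofList (List.replicate (pvIndent p + 4) ' ' ++ (PySem.Str.lstrip l).toList)
            else l
          else l
      l' :: pvGoB (some l') rest

def fix_first_line_after_colon_alt (lines : List String) : List String :=
  pvGoB none lines

-- ===== PRECONDITION & SPEC =====
def Spec_fix_first_line_after_colon (lines : List String) (out : List String) : Prop := out = fix_first_line_after_colon_alt lines
instance (lines : List String) (out : List String) : Decidable (Spec_fix_first_line_after_colon lines out) := by unfold Spec_fix_first_line_after_colon; infer_instance

-- ===== CLAIM (what is proved, stated in full; the proofs are below) =====
def Claim_equal_fix_first_line_after_colon : Prop := ∀ (lines : List String), Dom_fix_first_line_after_colon lines → Spec_fix_first_line_after_colon lines (fix_first_line_after_colon lines)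

-- ===== LEMMAS AND PROOFS =====

-- the two leading-space counters agree
theorem pvLead_eq (s : String) : pvCountLeadingSpaces s = pvIndent s := by
  unfold pvCountLeadingSpaces pvIndent
  have h := List.takeWhile_append_dropWhile (p := (· == ' ')) (l := s.toList)
  have := congrArg List.length h
  simp only [List.length_append] at this
  omega

-- position-relative form of A's blank scan: offset of the first non-blank line, length if none
def pvSkipFrom : List String → Nat
  | [] => 0
  | s :: r => if PySem.Str.strip s = "" then pvSkipFrom r + 1 else 0

theorem pvSkipBlank_eq (nl : List String) (j : Nat) :
    pvSkipBlank nl j = j + pvSkipFrom (nl.drop j) := by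
  rw [pvSkipBlank]
  by_cases h : j < nl.length
  · have hd : nl.drop j = nl[j] :: nl.drop (j + 1) := List.drop_eq_getElem_cons h
    have hg : nl.getD j "" = nl[j] := by simp [List.getD, h]
    by_cases hb : PySem.Str.strip (nl.getD j "") = ""
    · rw [if_pos ⟨h, hb⟩, pvSkipBlank_eq nl (j + 1), hd]
      simp only [pvSkipFrom, hg ▸ hb, if_pos]
      omega
    · rw [if_neg (by tauto), hd]
      simp [pvSkipFrom, hg ▸ hb]
  · rw [if_neg (by tauto)]
    simp [List.drop_eq_nil_of_le (by omega : nl.length ≤ j), pvSkipFrom]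
termination_by nl.length - j
decreasing_by omega

-- a whitespace-only line never passes A's/B's colon test
theorem pvBlank_not_colon (s : String) (h : PySem.Str.strip s = "") :
    PySem.Str.endswith (PySem.Str.rstrip s) ":" = false := by
  have h1 : PySem.Chars.strip s.toList = [] := by
    have := congrArg String.toList h
    simpa [PySem.Str.strip] using this
  have hall : ∀ c ∈ s.toList, PySem.Chars.isspace c = true := by
    have h2 : ∀ c ∈ PySem.Chars.lstrip s.toList, PySem.Chars.isspace c = true := by
      have : (PySem.Chars.lstrip s.toList).reverse.dropWhile PySem.Chars.isspace = [] := by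
        simpa [PySem.Chars.strip, PySem.Chars.rstrip, List.reverse_eq_nil_iff] using h1
      intro c hc
      exact (List.dropWhile_eq_nil_iff.mp this) c (by simpa using hc)
    intro c hc
    rw [← List.takeWhile_append_dropWhile (p := PySem.Chars.isspace) (l := s.toList)] at hc
    rcases List.mem_append.mp hc with hc | hc
    · exact List.mem_takeWhile_imp hc
    · exact h2 c hc
  have hr : PySem.Chars.rstrip s.toList = [] := by
    simp only [PySem.Chars.rstrip, List.reverse_eq_nil_iff, List.dropWhile_eq_nil_iff]
    intro c hc
    exact hall c (by simpa using hc)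
  simp [PySem.Str.endswith, PySem.Str.rstrip, hr, PySem.Chars.endswith, List.isSuffixOf]

-- the effect of processing one colon line on the suffix after it, as a list operation
def pvTail (p : String) (rest : List String) : List String :=
  if PySem.Str.endswith (PySem.Str.rstrip p) ":" then
    if pvSkipFrom rest < rest.length ∧ pvIndent (rest.getD (pvSkipFrom rest) "") ≤ pvIndent p then
      rest.set (pvSkipFrom rest)
        (String.ofList (List.replicate (pvIndent p + 4) ' ' ++ (PySem.Str.lstrip (rest.getD (pvSkipFrom rest) "")).toList))
    else rest
  else rest

theorem pvTail_length (p : String) (rest : List String) : (pvTail p rest).length = rest.length := by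
  unfold pvTail; split_ifs <;> simp

theorem pvTail_nil (p : String) : pvTail p [] = [] := by
  unfold pvTail; split_ifs with h1 h2 <;> simp_all [pvSkipFrom]

theorem pvTail_cons_blank (p l : String) (rs : List String) (hb : PySem.Str.strip l = "") :
    pvTail p (l :: rs) = l :: pvTail p rs := by
  have hs : pvSkipFrom (l :: rs) = pvSkipFrom rs + 1 := by simp [pvSkipFrom, hb]
  unfold pvTail
  rw [hs]
  simp only [List.getD_cons_succ, List.set_cons_succ, List.length_cons,
    Nat.add_lt_add_iff_right]
  split_ifs <;> rfl

theorem pvTail_of_not_colon (p : String) (rest : List String)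
    (h : PySem.Str.endswith (PySem.Str.rstrip p) ":" = false) : pvTail p rest = rest := by
  have h' : PySem.Chars.endswith (PySem.Chars.rstrip p.toList) [':'] = false := by simpa using h
  unfold pvTail
  rw [if_neg (by simp [h'])]

-- A's suffix recursion: process the head against its tail, then recurse on the modified tail
def pvRunA : List String → List String
  | [] => []
  | l :: rest => l :: pvRunA (pvTail l rest)
termination_by l => l.length
decreasing_by simp [pvTail_length]

theorem pvRunA_short (l : List String) (h : l.length ≤ 1) : pvRunA l = l := by
  match l with
  | [] => rw [pvRunA]
  | [x] => rw [pvRunA, pvTail_nil, pvRunA]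
  | x :: y :: r => simp at h

-- splitting a set at index (i+1)+s into keep-prefix / set-in-suffix
theorem pvSetSplit (nl : List String) (i s : Nat) (v : String) (hi : i + 1 ≤ nl.length) :
    nl.set ((i + 1) + s) v = nl.take (i + 1) ++ (nl.drop (i + 1)).set s v := by
  conv_lhs => rw [← List.take_append_drop (i + 1) nl]
  rw [List.set_append_right _ _ (by simp only [List.length_take]; omega)]
  have h : (i + 1) + s - (nl.take (i + 1)).length = s := by
    simp only [List.length_take]; omega
  rw [h]

-- one step of A's fold is: keep the first i+1 lines, apply pvTail to the rest
set_option maxHeartbeats 1000000 in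
theorem pvStepA_decomp (nl : List String) (i : Nat) (hi : i < nl.length) :
    pvStepA nl i = nl.take (i + 1) ++ pvTail (nl.getD i "") (nl.drop (i + 1)) := by
  have hlt : (nl.take (i + 1)).length = i + 1 := by simp; omega
  have hlen2 : nl.length = (i + 1) + (nl.drop (i + 1)).length := by simp; omega
  have hj : pvSkipBlank nl (i + 1) = (i + 1) + pvSkipFrom (nl.drop (i + 1)) :=
    pvSkipBlank_eq nl (i + 1)
  have hgd : nl.getD ((i + 1) + pvSkipFrom (nl.drop (i + 1))) ""
      = (nl.drop (i + 1)).getD (pvSkipFrom (nl.drop (i + 1))) "" := by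
    rw [List.getD_eq_getElem?_getD, List.getD_eq_getElem?_getD, List.getElem?_drop]
  have htad := List.take_append_drop (i + 1) nl
  simp only [pvStepA, pvTail, hj]
  by_cases hc : PySem.Str.endswith (PySem.Str.rstrip (nl.getD i "")) ":" = true
  · rw [if_pos hc, if_pos hc]
    by_cases h1 : pvSkipFrom (nl.drop (i + 1)) < (nl.drop (i + 1)).length
    · by_cases h2 : pvIndent ((nl.drop (i + 1)).getD (pvSkipFrom (nl.drop (i + 1))) "")
          ≤ pvIndent (nl.getD i "")
      · rw [if_pos (by omega), if_pos (by simp only [hgd, pvLead_eq]; exact h2),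
          if_pos ⟨h1, h2⟩]
        simp only [hgd, pvLead_eq]
        exact pvSetSplit nl i _ _ (by omega)
      · rw [if_pos (by omega), if_neg (by simp only [hgd, pvLead_eq]; exact h2),
          if_neg (by tauto)]
        exact htad.symm
    · rw [if_neg (by omega), if_neg (by tauto)]
      exact htad.symm
  · rw [if_neg hc, if_neg hc]
    exact htad.symm

-- A's whole fold over the remaining indices equals the suffix recursion
theorem pvFoldRun (k : Nat) (nl : List String) (i : Nat) (hk : nl.length - 1 - i = k) :
    (List.range' i k).foldl pvStepA nl = nl.take i ++ pvRunA (nl.drop i) := by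
  induction k generalizing nl i with
  | zero =>
    rw [List.range', List.foldl_nil, pvRunA_short _ (by simp; omega), List.take_append_drop]
  | succ k ih =>
    have hi : i < nl.length := by omega
    rw [List.range'_succ, List.foldl_cons]
    have hstep := pvStepA_decomp nl i hi
    have hlt : (nl.take (i + 1)).length = i + 1 := by simp; omega
    have hlen : (pvStepA nl i).length = nl.length := by
      rw [hstep]; simp [pvTail_length]; omega
    rw [ih (pvStepA nl i) (i + 1) (by omega)]
    have htake : (pvStepA nl i).take (i + 1) = nl.take (i + 1) := by
      rw [hstep]
      have h := List.take_left (l₁ := nl.take (i + 1))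
        (l₂ := pvTail (nl.getD i "") (nl.drop (i + 1)))
      rwa [hlt] at h
    have hdrop : (pvStepA nl i).drop (i + 1) = pvTail (nl.getD i "") (nl.drop (i + 1)) := by
      rw [hstep]
      have h := List.drop_left (l₁ := nl.take (i + 1))
        (l₂ := pvTail (nl.getD i "") (nl.drop (i + 1)))
      rwa [hlt] at h
    have hgd : nl.getD i "" = nl[i] := by simp [List.getD, hi]
    rw [htake, hdrop, hgd]
    conv_rhs => rw [List.drop_eq_getElem_cons hi, pvRunA]
    rw [List.take_succ_eq_append_getElem hi, List.append_assoc]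
    rfl

-- B's pass equals the suffix recursion once the pending parent (if any) is applied
def pvTailO : Option String → List String → List String
  | none, r => r
  | some p, r => pvTail p r

theorem pvGoB_run (rest : List String) (prev : Option String) :
    pvGoB prev rest = pvRunA (pvTailO prev rest) := by
  induction rest generalizing prev with
  | nil =>
    cases prev with
    | none => show pvGoB none [] = pvRunA []; rw [pvRunA, pvGoB]
    | some p => show pvGoB (some p) [] = pvRunA (pvTail p []); rw [pvTail_nil, pvRunA, pvGoB]
  | cons l rs ih =>
    by_cases hb : PySem.Str.strip l = ""
    · have hnc := pvBlank_not_colon l hb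
      have hone : ∀ X : List String, pvRunA (l :: X) = l :: pvRunA X := by
        intro X; rw [pvRunA, pvTail_of_not_colon _ _ hnc]
      cases prev with
      | none =>
        rw [pvGoB, if_pos hb, ih none]
        show l :: pvRunA rs = pvRunA (l :: rs)
        rw [hone]
      | some p =>
        rw [pvGoB, if_pos hb, ih (some p)]
        show l :: pvRunA (pvTail p rs) = pvRunA (pvTail p (l :: rs))
        rw [pvTail_cons_blank p l rs hb, hone]
    · cases prev with
      | none =>
        rw [pvGoB, if_neg hb]
        show l :: pvGoB (some l) rs = pvRunA (l :: rs)
        rw [ih (some l), pvRunA]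
        rfl
      | some p =>
        have hs0 : pvSkipFrom (l :: rs) = 0 := by simp [pvSkipFrom, hb]
        set l'' := (if PySem.Str.endswith (PySem.Str.rstrip p) ":" then
            if pvIndent l ≤ pvIndent p then
              String.ofList (List.replicate (pvIndent p + 4) ' ' ++ (PySem.Str.lstrip l).toList)
            else l
          else l) with hl''
        have hT : pvTail p (l :: rs) = l'' :: rs := by
          rw [pvTail, hl'', hs0]
          simp only [List.getD_cons_zero, List.length_cons, List.set_cons_zero]
          rw [if_congr (show (0 < rs.length + 1 ∧ pvIndent l ≤ pvIndent p)
              ↔ pvIndent l ≤ pvIndent p from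
            ⟨And.right, fun h => ⟨Nat.succ_pos _, h⟩⟩) rfl rfl]
          split_ifs <;> rfl
        have hL : pvGoB (some p) (l :: rs) = l'' :: pvGoB (some l'') rs := by
          rw [pvGoB, if_neg hb]
        show pvGoB (some p) (l :: rs) = pvRunA (pvTail p (l :: rs))
        rw [hL, ih (some l''), hT, pvRunA]
        rfl

-- ===== VERDICT (by name: the statement is the Claim_ definition above) =====
theorem fix_first_line_after_colon_spec : Claim_equal_fix_first_line_after_colon := by
  intro lines _
  unfold Spec_fix_first_line_after_colon fix_first_line_after_colon fix_first_line_after_colon_alt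
  rw [List.range_eq_range', pvFoldRun (lines.length - 1) lines 0 (by omega),
    pvGoB_run lines none]
  rfl
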